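-- pv_equiv track=rewrite | github.com/smilejay/python | py2015/beer.py | bottles_cnt_beer
-- ===== SOURCE A (Python) =====
-- def bottles_cnt_beer(money=10):
--     '''
--     计算能够喝到多少瓶啤酒。
--     供参考答案如下：
--     10 -> 7
--     100 -> 75
--     1234 -> 925
--     12345 -> 9258
--     '''
--     price = 2
--     m = 3   # m empty bottles --> 1 bottle of beer
--     count = int(money / price)
--     empty_cnt = int(money / price)
--     while empty_cnt >= m:
--         count += int(empty_cnt / m)
--         empty_cnt = int(empty_cnt / m) + int(empty_cnt % m)
--     # borrow 1 empt bottle from the shop; drink; return 1 empty bottle to the shop.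
--     if empty_cnt == (m - 1):
--         count += 1
--     return count
-- ===== SOURCE B (Python) =====
-- def bottles_cnt_beer(money=10):
--     b = int(money / 2)
--     return b + b // 2 if b > 0 else b
-- ===== Notes on version B (the rewrite author's own statement) =====
-- stated objective: simpler
-- what changed: Replaces the iterative empties-exchange loop plus borrow check with a single closed-form arithmetic expression on the truncated initial bottle count, guarded for nonpositive counts.
import Mathlib
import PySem

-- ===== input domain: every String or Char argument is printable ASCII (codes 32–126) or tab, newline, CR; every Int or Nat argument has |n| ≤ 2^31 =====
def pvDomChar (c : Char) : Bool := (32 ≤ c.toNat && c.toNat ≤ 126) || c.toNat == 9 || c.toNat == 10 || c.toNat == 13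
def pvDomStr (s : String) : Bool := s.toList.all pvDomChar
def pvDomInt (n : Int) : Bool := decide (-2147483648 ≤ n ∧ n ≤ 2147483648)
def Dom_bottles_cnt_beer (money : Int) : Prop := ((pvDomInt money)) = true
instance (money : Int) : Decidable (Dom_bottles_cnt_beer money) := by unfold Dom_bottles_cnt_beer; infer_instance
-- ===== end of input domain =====

-- B replaces A's empties-exchange loop and borrow check with the closed form b + b//2 (simpler).
-- int(money / 2) truncates toward zero; on Dom (|money| ≤ 2^31) the float division is exact, so it is Int.tdiv.

-- ===== PORT A =====
-- while empty_cnt >= 3: count += empty_cnt//3 (trunc); empty_cnt = trunc-div + trunc-mod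
def beerLoop (count empty : Int) : Int × Int :=
  if _h : 3 ≤ empty then
    beerLoop (count + empty.tdiv 3) (empty.tdiv 3 + empty.tmod 3)
  else (count, empty)
termination_by empty.toNat
decreasing_by
  have h1 : empty.tdiv 3 = empty / 3 := Int.tdiv_eq_ediv_of_nonneg (by omega)
  have h2 : empty.tmod 3 = empty % 3 := Int.tmod_eq_emod_of_nonneg (by omega)
  simp only [h1, h2]
  omega

def bottles_cnt_beer (money : Int) : Int :=
  let count := money.tdiv 2
  let r := beerLoop count count
  if r.2 = 2 then r.1 + 1 else r.1

-- ===== PORT B =====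
def bottles_cnt_beer_alt (money : Int) : Int :=
  let b := money.tdiv 2
  if 0 < b then b + PySem.Int.floordiv b 2 else b

-- ===== PRECONDITION & SPEC =====
def Spec_bottles_cnt_beer (money : Int) (out : Int) : Prop := out = bottles_cnt_beer_alt money
instance (money : Int) (out : Int) : Decidable (Spec_bottles_cnt_beer money out) := by unfold Spec_bottles_cnt_beer; infer_instance

-- ===== CLAIM (what is proved, stated in full; the proofs are below) =====
def Claim_equal_bottles_cnt_beer : Prop := ∀ (money : Int), Dom_bottles_cnt_beer money → Spec_bottles_cnt_beer money (bottles_cnt_beer money)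

-- ===== LEMMAS AND PROOFS =====

-- The loop plus the borrow check telescopes to adding ⌊e/2⌋ beers for e ≥ 0 starting empties.
theorem beerLoop_spec (count empty : Int) (he : 0 ≤ empty) :
    (if (beerLoop count empty).2 = 2 then (beerLoop count empty).1 + 1
     else (beerLoop count empty).1) = count + empty / 2 := by
  induction count, empty using beerLoop.induct with
  | case1 c e h ih =>
    rw [beerLoop]
    simp only [h, dite_true]
    have h1 : e.tdiv 3 = e / 3 := Int.tdiv_eq_ediv_of_nonneg (by omega)
    have h2 : e.tmod 3 = e % 3 := Int.tmod_eq_emod_of_nonneg (by omega)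
    rw [h1, h2] at ih ⊢
    rw [ih (by omega)]
    omega
  | case2 c e h =>
    rw [beerLoop]
    simp only [h, dite_false]
    split <;> omega

theorem bottles_cnt_beer_spec : Claim_equal_bottles_cnt_beer := by
  intro money _
  unfold Spec_bottles_cnt_beer bottles_cnt_beer bottles_cnt_beer_alt
  dsimp only
  generalize money.tdiv 2 = b
  by_cases hpos : 0 ≤ b
  · rw [beerLoop_spec b b hpos]
    have hf : PySem.Int.floordiv b 2 = b / 2 := by
      simp [PySem.Int.floordiv, Int.fdiv_eq_ediv]
    rw [hf]
    split <;> omega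
  · have hlt : ¬ 3 ≤ b := by omega
    rw [beerLoop]
    simp only [hlt, dite_false]
    have h0 : ¬ (0:Int) < b := by omega
    have h2 : b ≠ 2 := by omega
    simp [h0, h2]

-- ===== VERDICT (by name: the statement is the Claim_ definition above) =====
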